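-- pv_equiv track=rewrite | github.com/jedyeiser/Backgammon | backend/apps/ai/evaluation/backgammon.py | longest_prime
-- ===== SOURCE A (Python) =====
-- from typing import Any, Dict, List, Tuple
--
-- def longest_prime(game_state: Dict[str, Any], player: str) -> int:
--     """
--     Find the longest prime (consecutive made points) for a player.
--
--     A 6-prime (all 6 consecutive points made) completely blocks
--     the opponent's checkers behind it.
--
--     Args:
--         game_state: Backgammon game state.
--         player: 'white' or 'black'.
--
--     Returns:
--         Length of longest consecutive made points (0-6).
--     """
--     points = game_state.get('points', {})
--
--     # Create a list of whether each point is made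
--     made = [False] * 24
--     for i in range(24):
--         point = i + 1
--         count = points.get(str(point), 0)
--         if player == 'white' and count >= 2:
--             made[i] = True
--         elif player == 'black' and count <= -2:
--             made[i] = True
--
--     # Find longest consecutive run
--     max_length = 0
--     current_length = 0
--
--     for is_made in made:
--         if is_made:
--             current_length += 1
--             max_length = max(max_length, current_length)
--         else:
--             current_length = 0
--
--     return max_length
-- ===== SOURCE B (Python) =====
-- def longest_prime(game_state, player):
--     """Longest consecutive made points, via a marker string split on '0'."""
--     points = game_state.get('points', {})
--     if player == 'white':
--         s = ''.join('1' if points.get(str(i), 0) >= 2 else '0' for i in range(1, 25))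
--     elif player == 'black':
--         s = ''.join('1' if points.get(str(i), 0) <= -2 else '0' for i in range(1, 25))
--     else:
--         return 0
--     return max(len(run) for run in s.split('0'))
-- ===== Notes on version B (the rewrite author's own statement) =====
-- stated objective: idiomatic
-- what changed: Replaces A's boolean array plus explicit current/max run-accumulator scan with building a '1'/'0' marker string over points 1..24 and returning the maximum length of the segments obtained by splitting it on '0'; unknown players return 0 by an early return instead of scanning an all-false array.
import Mathlib
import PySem

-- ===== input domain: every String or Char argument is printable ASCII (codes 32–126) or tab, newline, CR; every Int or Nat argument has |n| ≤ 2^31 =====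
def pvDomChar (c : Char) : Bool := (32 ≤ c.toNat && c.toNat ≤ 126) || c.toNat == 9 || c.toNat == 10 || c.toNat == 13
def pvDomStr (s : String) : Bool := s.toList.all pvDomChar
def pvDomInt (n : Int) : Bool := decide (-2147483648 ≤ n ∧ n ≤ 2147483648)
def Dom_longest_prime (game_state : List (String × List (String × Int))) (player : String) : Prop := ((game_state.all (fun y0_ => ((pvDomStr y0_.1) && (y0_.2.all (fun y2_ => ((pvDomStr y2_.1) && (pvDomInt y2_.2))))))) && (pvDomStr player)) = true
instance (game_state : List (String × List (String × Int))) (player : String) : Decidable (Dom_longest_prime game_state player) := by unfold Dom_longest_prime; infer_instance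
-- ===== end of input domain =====

-- B replaces A's boolean-array + current/max accumulator scan by a '1'/'0' marker string
-- split on '0' (max segment length); same values, idiomatic decomposition.

-- ===== PORT A =====
-- i.toNat is exact here: i ranges over range(0, 24), so 0 ≤ i.
def longest_prime (game_state : List (String × List (String × Int))) (player : String) : Int :=
  let points := PySem.Dict.mk (PySem.Dict.getD (PySem.Dict.mk game_state) "points" [])
  let made : List Bool :=
    (PySem.List.pyRange 0 24 1).foldl (fun md i =>
      let point := i + 1
      let count := PySem.Dict.getD points (PySem.Int.toStr point) 0
      if player == "white" && decide (2 ≤ count) then md.set i.toNat true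
      else if player == "black" && decide (count ≤ -2) then md.set i.toNat true
      else md) (List.replicate 24 false)
  (made.foldl (fun (p : Int × Int) is_made =>
      if is_made then (max p.1 (p.2 + 1), p.2 + 1) else (p.1, 0)) (0, 0)).1

-- ===== PORT B =====
-- marker string over points 1..24: '1' iff the point is made for the predicate p
def pvMarks (points : PySem.Dict String Int) (p : Int → Bool) : List Char :=
  (PySem.List.pyRange 1 25 1).map (fun i =>
    if p (PySem.Dict.getD points (PySem.Int.toStr i) 0) then '1' else '0')

-- max(len(run) for run in parts); parts of a split are never empty, so the [] arm is unreachable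
def pvMaxPartLen (parts : List (List Char)) : Int :=
  match parts.map (fun r => (r.length : Int)) with
  | [] => 0
  | h :: t => t.foldl max h

def longest_prime_alt (game_state : List (String × List (String × Int))) (player : String) : Int :=
  let points := PySem.Dict.mk (PySem.Dict.getD (PySem.Dict.mk game_state) "points" [])
  if player == "white" then
    pvMaxPartLen (PySem.Chars.splitOn (pvMarks points (fun c => decide (2 ≤ c))) ['0'])
  else if player == "black" then
    pvMaxPartLen (PySem.Chars.splitOn (pvMarks points (fun c => decide (c ≤ -2))) ['0'])
  else 0

-- ===== PRECONDITION & SPEC =====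
def Spec_longest_prime (game_state : List (String × List (String × Int))) (player : String) (out : Int) : Prop := out = longest_prime_alt game_state player
instance (game_state : List (String × List (String × Int))) (player : String) (out : Int) : Decidable (Spec_longest_prime game_state player out) := by unfold Spec_longest_prime; infer_instance

-- ===== CLAIM (what is proved, stated in full; the proofs are below) =====
def Claim_equal_longest_prime : Prop := ∀ (game_state : List (String × List (String × Int))) (player : String), Dom_longest_prime game_state player → Spec_longest_prime game_state player (longest_prime game_state player)

-- ===== LEMMAS AND PROOFS =====

-- the list of parts splitting on '0' produces, computed structurally
def charRuns : List Char → List (List Char)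
  | [] => [[]]
  | c :: t =>
    if c = '0' then [] :: charRuns t
    else match charRuns t with
      | [] => [[c]]
      | h :: r => (c :: h) :: r

theorem charRuns_ne_nil (l : List Char) : charRuns l ≠ [] := by
  induction l with
  | nil => simp [charRuns]
  | cons c t ih =>
    simp only [charRuns]
    split
    · simp
    · split <;> simp

theorem go_spec (fuel : Nat) (l cur : List Char) (acc : List (List Char)) (h : l.length < fuel) :
    PySem.Chars.splitOn.go ['0'] fuel l cur acc =
      acc.reverse ++ (match charRuns l with
        | [] => []
        | hd :: r => (cur.reverse ++ hd) :: r) := by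
  induction fuel generalizing l cur acc with
  | zero => omega
  | succ fuel ih =>
    match l with
    | [] => simp [PySem.Chars.splitOn.go, charRuns]
    | c :: rest =>
      by_cases hc : c = '0'
      · subst hc
        rw [PySem.Chars.splitOn.go]
        simp only [List.isPrefixOf, BEq.rfl, Bool.true_and, if_pos]
        simp only [List.length_cons, List.drop_succ_cons, List.drop_zero, List.length_nil]
        rw [ih rest [] (cur.reverse :: acc) (by simpa using Nat.lt_of_succ_lt_succ h)]
        simp only [charRuns]
        rcases hcr : charRuns rest with _ | ⟨hd, r⟩
        · exact absurd hcr (charRuns_ne_nil rest)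
        · simp
      · rw [PySem.Chars.splitOn.go]
        have hpre : List.isPrefixOf ['0'] (c :: rest) = false := by
          simp [List.isPrefixOf]
          intro hcc; exact absurd hcc.symm hc
        rw [hpre]
        simp only [Bool.false_eq_true, if_false]
        rw [ih rest (c :: cur) acc (by simpa using Nat.lt_of_succ_lt_succ h)]
        simp only [charRuns, if_neg hc]
        rcases hcr : charRuns rest with _ | ⟨hd, r⟩
        · exact absurd hcr (charRuns_ne_nil rest)
        · simp

theorem splitOn_zero (s : List Char) : PySem.Chars.splitOn s ['0'] = charRuns s := by
  have := go_spec (s.length + 1) s [] [] (by omega)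
  rw [PySem.Chars.splitOn, this]
  rcases hcr : charRuns s with _ | ⟨hd, r⟩
  · exact absurd hcr (charRuns_ne_nil s)
  · simp

-- (length of the first run, lengths of the later runs) of a boolean sequence
def runsB : List Bool → Int × List Int
  | [] => (0, [])
  | b :: t =>
    let p := runsB t
    if b then (p.1 + 1, p.2) else (0, p.1 :: p.2)

theorem runsB_fst_nonneg (bs : List Bool) : 0 ≤ (runsB bs).1 := by
  induction bs with
  | nil => simp [runsB]
  | cons b t ih => rcases b <;> simp [runsB] <;> omega

theorem scan_spec (bs : List Bool) : ∀ (m c : Int), 0 ≤ c → c ≤ m →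
    (bs.foldl (fun (p : Int × Int) b => if b then (max p.1 (p.2 + 1), p.2 + 1) else (p.1, 0)) (m, c)).1
      = (runsB bs).2.foldl max (max m ((runsB bs).1 + c)) := by
  induction bs with
  | nil => intro m c h0 hcm; simp [runsB]; omega
  | cons b t ih =>
    intro m c h0 hcm
    rcases b
    · simp only [List.foldl_cons, if_neg Bool.false_ne_true, runsB]
      rw [ih m 0 le_rfl (le_trans h0 hcm)]
      show _ = List.foldl max _ ((runsB t).1 :: (runsB t).2)
      rw [List.foldl_cons]
      congr 1
      have := runsB_fst_nonneg t
      omega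
    · simp only [List.foldl_cons, runsB, if_true]
      rw [ih (max m (c+1)) (c+1) (by omega) (by omega)]
      congr 1
      have := runsB_fst_nonneg t
      omega

def boolChar (b : Bool) : Char := if b then '1' else '0'

theorem charRuns_map_boolChar (bs : List Bool) :
    (charRuns (bs.map boolChar)).map (fun r => (r.length : Int)) = (runsB bs).1 :: (runsB bs).2 := by
  induction bs with
  | nil => simp [charRuns, runsB]
  | cons b t ih =>
    rcases b
    · simp only [List.map_cons, boolChar, if_neg Bool.false_ne_true, charRuns, if_pos rfl, runsB]
      simp [ih]
    · simp only [List.map_cons, boolChar, if_true, charRuns, runsB]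
      rw [if_neg (by decide)]
      rcases hcr : charRuns (t.map boolChar) with _ | ⟨hd, r⟩
      · exact absurd hcr (charRuns_ne_nil _)
      · have h2 := ih; rw [hcr] at h2
        simp only [List.map_cons, List.cons.injEq] at h2 ⊢
        refine ⟨?_, h2.2⟩
        have := h2.1
        simp only [List.length_cons]
        push_cast
        omega

theorem setfold (g : Int → Bool) (n : Nat) : ∀ (k : Nat), k ≤ n →
    (PySem.List.pyRange 0 k 1).foldl (fun md i => if g i then md.set i.toNat true else md)
        (List.replicate n false)
      = ((PySem.List.pyRange 0 k 1).map g) ++ List.replicate (n - k) false := by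
  intro k
  induction k with
  | zero =>
    intro _
    rw [show ((0:Nat):Int) = 0 from rfl, PySem.List.pyRange_one_eq_nil le_rfl]
    simp
  | succ k ih =>
    intro hk
    have hrange : PySem.List.pyRange 0 (↑(k+1) : Int) 1
        = PySem.List.pyRange 0 k 1 ++ [(k : Int)] := by
      push_cast
      exact PySem.List.pyRange_one_succ_right (by positivity)
    rw [hrange, List.foldl_append, List.map_append, ih (by omega)]
    have hlen : ((PySem.List.pyRange 0 (k:Int) 1).map g).length = k := by
      simp [PySem.List.length_pyRange_one]
    have hrep : List.replicate (n - k) false = false :: List.replicate (n - (k+1)) false := by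
      have : n - k = (n - (k+1)) + 1 := by omega
      rw [this, List.replicate_succ]
    simp only [List.foldl_cons, List.foldl_nil]
    by_cases hg : g (k : Int)
    · rw [if_pos hg, hrep, Int.toNat_natCast]
      rw [List.set_append_right _ _ (by omega)]
      simp [hlen, hg]
    · rw [if_neg hg, hrep]
      simp [hg]

theorem marks_eq (points : PySem.Dict String Int) (p : Int → Bool) :
    pvMarks points p
      = ((PySem.List.pyRange 0 24 1).map
          (fun i => p (PySem.Dict.getD points (PySem.Int.toStr (i+1)) 0))).map boolChar := by
  simp only [pvMarks, List.map_map]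
  rw [show (25:Int) = 1 + 24 from rfl, show (24:Int) = 0 + 24 from rfl,
      PySem.List.pyRange_one, PySem.List.pyRange_one]
  simp only [List.map_map]
  apply List.map_congr_left
  intro k _
  simp only [Function.comp, boolChar]
  ring_nf

theorem branch_eq (points : PySem.Dict String Int) (p : Int → Bool) :
    (((PySem.List.pyRange 0 24 1).foldl
          (fun md i =>
            if p (PySem.Dict.getD points (PySem.Int.toStr (i+1)) 0) then md.set i.toNat true else md)
          (List.replicate 24 false)).foldl
        (fun (q : Int × Int) b => if b then (max q.1 (q.2 + 1), q.2 + 1) else (q.1, 0)) (0, 0)).1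
      = pvMaxPartLen (PySem.Chars.splitOn (pvMarks points p) ['0']) := by
  have hsf := setfold (fun i => p (PySem.Dict.getD points (PySem.Int.toStr (i+1)) 0)) 24 24 le_rfl
  norm_num at hsf
  rw [hsf]
  set bs := (PySem.List.pyRange 0 (24:Int) 1).map
      (fun i => p (PySem.Dict.getD points (PySem.Int.toStr (i+1)) 0)) with hbs
  rw [scan_spec bs 0 0 le_rfl le_rfl]
  rw [pvMaxPartLen, marks_eq, splitOn_zero, ← hbs, charRuns_map_boolChar]
  simp only
  congr 1
  have := runsB_fst_nonneg bs
  omega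

-- ===== VERDICT (by name: the statement is the Claim_ definition above) =====
theorem longest_prime_spec : Claim_equal_longest_prime := by
  intro game_state player _
  show longest_prime game_state player = longest_prime_alt game_state player
  unfold longest_prime longest_prime_alt
  set points := PySem.Dict.mk (PySem.Dict.getD (PySem.Dict.mk game_state) "points" [])
  by_cases hw : player = "white"
  · subst hw
    simp only [show (("white":String) == "white") = true from rfl,
               show (("white":String) == "black") = false from rfl,
               Bool.true_and, Bool.false_and, if_true, Bool.false_eq_true, if_false]
    exact branch_eq points (fun c => decide (2 ≤ c))
  · by_cases hb : player = "black"
    · subst hb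
      simp only [show (("black":String) == "white") = false from rfl,
                 show (("black":String) == "black") = true from rfl,
                 Bool.true_and, Bool.false_and, if_true, Bool.false_eq_true, if_false]
      exact branch_eq points (fun c => decide (c ≤ -2))
    · have hw' : (player == "white") = false := by simpa using hw
      have hb' : (player == "black") = false := by simpa using hb
      simp only [hw', hb', Bool.false_and, Bool.false_eq_true, if_false]
      decide
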